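-- pv_equiv track=rewrite | github.com/madr/julkalendern | 2020-python/solutions/day_04.py | exactly_1_valid_eye_color
-- ===== SOURCE A (Python) =====
-- def exactly_1_valid_eye_color(data):
--     return (
--         sum(
--             f"ecl:{cl} " in data
--             for cl in ["amb", "blu", "brn", "gry", "grn", "hzl", "oth"]
--         )
--         == 1
--     )
-- ===== SOURCE B (Python) =====
-- def exactly_1_valid_eye_color(data):
--     # One left-to-right scan collecting the distinct valid eye-color tokens
--     # into a set, instead of seven independent whole-string substring searches.
--     patterns = ["ecl:" + cl + " " for cl in ("amb", "blu", "brn", "gry", "grn", "hzl", "oth")]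
--     found = set()
--     for i in range(len(data)):
--         if data.startswith("ecl:", i):
--             for p in patterns:
--                 if data.startswith(p, i):
--                     found.add(p)
--     return len(found) == 1
-- ===== Notes on version B (the rewrite author's own statement) =====
-- stated objective: alternative
-- what changed: A sums seven independent whole-string substring membership tests, one per eye color; B scans the positions of data once, collecting the distinct valid eye-color tokens it finds there into a set, and tests that the set has exactly one element.
import Mathlib
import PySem

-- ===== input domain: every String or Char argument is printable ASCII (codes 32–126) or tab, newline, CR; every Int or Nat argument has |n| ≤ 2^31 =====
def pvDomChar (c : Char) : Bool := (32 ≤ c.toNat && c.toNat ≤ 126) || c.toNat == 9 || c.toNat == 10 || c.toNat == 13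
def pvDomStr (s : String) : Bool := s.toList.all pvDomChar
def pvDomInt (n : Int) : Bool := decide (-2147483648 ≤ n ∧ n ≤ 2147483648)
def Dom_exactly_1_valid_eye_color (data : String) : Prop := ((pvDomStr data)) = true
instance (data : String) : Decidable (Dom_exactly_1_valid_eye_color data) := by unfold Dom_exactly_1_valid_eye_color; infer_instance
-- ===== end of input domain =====

-- B replaces A's seven independent whole-string substring searches by one left-to-right
-- scan of the string that collects the distinct valid eye-color tokens into a set
-- (alternative decomposition; not claimed faster).


-- ===== PORT A =====
-- the literal list ["amb", "blu", "brn", "gry", "grn", "hzl", "oth"]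
def pvColors : List (List Char) :=
  ["amb".toList, "blu".toList, "brn".toList, "gry".toList, "grn".toList, "hzl".toList, "oth".toList]

-- sum(f"ecl:{cl} " in data for cl in [...]) == 1
def exactly_1_valid_eye_color (data : String) : Bool :=
  ((pvColors.map (fun cl =>
      if PySem.Chars.isIn ("ecl:".toList ++ cl ++ [' ']) data.toList then (1 : Int) else 0)).sum) == 1

-- ===== PORT B =====
-- patterns = ["ecl:" + cl + " " for cl in (...)]
def pvPat (cl : List Char) : List Char := "ecl:".toList ++ cl ++ [' ']
def pvPatterns : List (List Char) := pvColors.map pvPat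

-- loop body for one index i; data.startswith(p, i) with 0 ≤ i ≤ len(data) is exactly
-- 'p <+: data[i:]', ported as PySem.Chars.startswith on the dropped suffix (exact here:
-- i ranges over 0 .. len(data)-1).
def pvStep (cs : List Char) (found : PySem.Set (List Char)) (i : Int) : PySem.Set (List Char) :=
  if PySem.Chars.startswith (cs.drop i.toNat) "ecl:".toList then
    pvPatterns.foldl (fun acc p =>
      if PySem.Chars.startswith (cs.drop i.toNat) p then PySem.Set.add acc p else acc) found
  else found

def exactly_1_valid_eye_color_alt (data : String) : Bool :=
  let cs := data.toList
  let found := (PySem.List.pyRange 0 (PySem.Str.len data) 1).foldl (pvStep cs) PySem.Set.empty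
  PySem.Set.len found == 1

-- ===== PRECONDITION & SPEC =====
def Spec_exactly_1_valid_eye_color (data : String) (out : Bool) : Prop := out = exactly_1_valid_eye_color_alt data
instance (data : String) (out : Bool) : Decidable (Spec_exactly_1_valid_eye_color data out) := by unfold Spec_exactly_1_valid_eye_color; infer_instance

-- ===== CLAIM (what is proved, stated in full; the proofs are below) =====
def Claim_equal_exactly_1_valid_eye_color : Prop := ∀ (data : String), Dom_exactly_1_valid_eye_color data → Spec_exactly_1_valid_eye_color data (exactly_1_valid_eye_color data)

-- ===== LEMMAS AND PROOFS =====

-- every pattern starts with "ecl:" (justifies B's quick guard)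
theorem pv_ecl_prefix : ∀ p ∈ pvPatterns, "ecl:".toList <+: p := by decide

-- no pattern is empty
theorem pv_pat_ne_nil : ∀ p ∈ pvPatterns, p ≠ [] := by decide

theorem pv_patterns_nodup : pvPatterns.Nodup := by decide

-- membership after the inner loop over the pattern list
theorem pv_inner_mem (s : List Char) (ps : List (List Char)) (found : PySem.Set (List Char)) (x : List Char) :
    x ∈ ps.foldl (fun acc p => if PySem.Chars.startswith s p then PySem.Set.add acc p else acc) found ↔
      x ∈ found ∨ (x ∈ ps ∧ PySem.Chars.startswith s x = true) := by
  induction ps generalizing found with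
  | nil => simp
  | cons p ps ih =>
    simp only [List.foldl_cons, ih, List.mem_cons]
    by_cases h : PySem.Chars.startswith s p = true
    · simp [h, PySem.Set.mem_add]
      constructor
      · rintro ((hf | rfl) | ⟨hm, hs⟩)
        · exact Or.inl hf
        · exact Or.inr ⟨Or.inl rfl, h⟩
        · exact Or.inr ⟨Or.inr hm, hs⟩
      · rintro (hf | ⟨(rfl | hm), hs⟩)
        · exact Or.inl (Or.inl hf)
        · exact Or.inl (Or.inr rfl)
        · exact Or.inr ⟨hm, hs⟩
    · simp only [h]
      constructor
      · rintro (hf | ⟨hm, hs⟩)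
        · exact Or.inl hf
        · exact Or.inr ⟨Or.inr hm, hs⟩
      · rintro (hf | ⟨(rfl | hm), hs⟩)
        · exact Or.inl hf
        · exact absurd hs h
        · exact Or.inr ⟨hm, hs⟩

-- membership after one step of the outer loop
theorem pv_step_mem (cs : List Char) (found : PySem.Set (List Char)) (i : Int) (x : List Char) :
    x ∈ pvStep cs found i ↔
      x ∈ found ∨ (x ∈ pvPatterns ∧ PySem.Chars.startswith (cs.drop i.toNat) x = true) := by
  unfold pvStep
  by_cases h : PySem.Chars.startswith (cs.drop i.toNat) "ecl:".toList = true
  · simp only [h, if_true, pv_inner_mem]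
  · simp only [h]
    constructor
    · exact Or.inl
    · rintro (hf | ⟨hm, hs⟩)
      · exact hf
      · exact absurd ((PySem.Chars.startswith_iff _ _).mpr
          ((pv_ecl_prefix x hm).trans ((PySem.Chars.startswith_iff _ _).mp hs))) h

-- membership after folding pvStep over any index list
theorem pv_fold_mem (cs : List Char) (I : List Int) (found : PySem.Set (List Char)) (x : List Char) :
    x ∈ I.foldl (pvStep cs) found ↔
      x ∈ found ∨ ∃ i ∈ I, x ∈ pvPatterns ∧ PySem.Chars.startswith (cs.drop i.toNat) x = true := by
  induction I generalizing found with
  | nil => simp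
  | cons i I ih =>
    simp only [List.foldl_cons, ih, pv_step_mem, List.mem_cons]
    constructor
    · rintro ((hf | hi) | ⟨j, hj, hx⟩)
      · exact Or.inl hf
      · exact Or.inr ⟨i, Or.inl rfl, hi⟩
      · exact Or.inr ⟨j, Or.inr hj, hx⟩
    · rintro (hf | ⟨j, (rfl | hj), hx⟩)
      · exact Or.inl (Or.inl hf)
      · exact Or.inl (Or.inr hx)
      · exact Or.inr ⟨j, hj, hx⟩

theorem pv_inner_nodup (s : List Char) (ps : List (List Char)) (found : PySem.Set (List Char))
    (h : found.Nodup) :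
    (ps.foldl (fun acc p => if PySem.Chars.startswith s p then PySem.Set.add acc p else acc) found).Nodup := by
  induction ps generalizing found with
  | nil => exact h
  | cons p ps ih =>
    simp only [List.foldl_cons]
    apply ih
    split
    · exact PySem.Set.nodup_add _ _ h
    · exact h

theorem pv_fold_nodup (cs : List Char) (I : List Int) (found : PySem.Set (List Char))
    (h : found.Nodup) : (I.foldl (pvStep cs) found).Nodup := by
  induction I generalizing found with
  | nil => exact h
  | cons i I ih =>
    apply ih
    unfold pvStep
    split
    · exact pv_inner_nodup _ _ _ h
    · exact h

-- a pattern occurs at some index of range(len cs) iff it is a substring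
theorem pv_exists_idx_iff (cs : List Char) (p : List Char) (hp : p ≠ []) :
    (∃ i ∈ PySem.List.pyRange 0 (cs.length : Int) 1,
        PySem.Chars.startswith (cs.drop i.toNat) p = true) ↔ PySem.Chars.isIn p cs = true := by
  rw [← PySem.Chars.exists_prefix_drop_iff_isIn]
  constructor
  · rintro ⟨i, _, hs⟩
    exact ⟨i.toNat, (PySem.Chars.startswith_iff _ _).mp hs⟩
  · rintro ⟨j, hj⟩
    have hjlt : j < cs.length := by
      by_contra hge
      rw [List.drop_eq_nil_of_le (le_of_not_gt hge)] at hj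
      exact hp (List.prefix_nil.mp hj)
    refine ⟨(j : Int), ?_, ?_⟩
    · rw [PySem.List.mem_pyRange_one]
      omega
    · rw [Int.toNat_natCast]
      exact (PySem.Chars.startswith_iff _ _).mpr hj

-- ===== VERDICT (by name: the statement is the Claim_ definition above) =====
theorem exactly_1_valid_eye_color_spec : Claim_equal_exactly_1_valid_eye_color := by
  intro data _
  unfold Spec_exactly_1_valid_eye_color exactly_1_valid_eye_color exactly_1_valid_eye_color_alt
  set cs := data.toList with hcs
  -- A's 0/1 sum is a countP over the colors, i.e. over the patterns
  rw [PySem.List.sum_map_ite_one_zero (fun cl => PySem.Chars.isIn ("ecl:".toList ++ cl ++ [' ']) cs)]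
  -- B's set has the same members as the filtered pattern list
  set F := pvPatterns.filter (fun p => PySem.Chars.isIn p cs) with hF
  set found := (PySem.List.pyRange 0 (PySem.Str.len data) 1).foldl (pvStep cs) PySem.Set.empty with hfound
  have hlen : PySem.Str.len data = (cs.length : Int) := PySem.Str.len_eq data
  have hmem : ∀ x, x ∈ found ↔ x ∈ F := by
    intro x
    rw [hfound, hlen, pv_fold_mem, hF, List.mem_filter]
    simp only [PySem.Set.empty, List.not_mem_nil, false_or]
    constructor
    · rintro ⟨i, hi, hx, hs⟩
      exact ⟨hx, (pv_exists_idx_iff cs x (pv_pat_ne_nil x hx)).mp ⟨i, hi, hs⟩⟩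
    · rintro ⟨hx, hin⟩
      obtain ⟨i, hi, hs⟩ := (pv_exists_idx_iff cs x (pv_pat_ne_nil x hx)).mpr hin
      exact ⟨i, hi, hx, hs⟩
  have hperm : found.Perm F :=
    (List.perm_ext_iff_of_nodup (pv_fold_nodup cs _ _ List.nodup_nil)
      (pv_patterns_nodup.filter _)).mpr hmem
  have hlenF : found.length = F.length := hperm.length_eq
  have hcount : F.length = pvColors.countP
      (fun cl => PySem.Chars.isIn ("ecl:".toList ++ cl ++ [' ']) cs) := by
    rw [hF, ← List.countP_eq_length_filter, pvPatterns, List.countP_map]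
    rfl
  have h3 : found.length = pvColors.countP
      (fun cl => PySem.Chars.isIn ("ecl:".toList ++ cl ++ [' ']) cs) := hlenF.trans hcount
  exact congrArg (fun n : Nat => ((n : Int) == 1)) h3.symm
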